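-- pv_equiv track=rewrite | github.com/RMCV-Rajapaksha/Competitive-Programing-New | Haxtream 2024/Pool Problem.py | longest_suffix_in_subsequence
-- ===== SOURCE A (Python) =====
-- def longest_suffix_in_subsequence(s, queries):
--     results = []
--
--     for p in queries:
--         i = len(p) - 1
--         j = len(s) - 1
--
--
--         matched_length = 0
--         while i >= 0 and j >= 0:
--             if p[i] == s[j]:
--                 matched_length += 1
--                 i -= 1
--             j -= 1
--
--         results.append(matched_length)
--
--     return results
-- ===== SOURCE B (Python) =====
-- def longest_suffix_in_subsequence(s, queries):
--     # Precompute, for each position j of s, the latest occurrence index of each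
--     # character in s[:j+1]; each query then jumps per matched character.
--     prev = []
--     last = {}
--     for j, ch in enumerate(s):
--         last[ch] = j
--         prev.append(dict(last))
--     results = []
--     n = len(s)
--     for p in queries:
--         j = n - 1
--         cnt = 0
--         for ch in reversed(p):
--             if j < 0:
--                 break
--             k = prev[j].get(ch, -1)
--             if k < 0:
--                 break
--             cnt += 1
--             j = k - 1
--         results.append(cnt)
--     return results
-- ===== Notes on version B (the rewrite author's own statement) =====
-- stated objective: faster
-- what changed: Instead of rescanning s from the right for every query, B precomputes a per-position last-occurrence table of s once and answers each query by jumping directly to the last occurrence of each matched character.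
import Mathlib
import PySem

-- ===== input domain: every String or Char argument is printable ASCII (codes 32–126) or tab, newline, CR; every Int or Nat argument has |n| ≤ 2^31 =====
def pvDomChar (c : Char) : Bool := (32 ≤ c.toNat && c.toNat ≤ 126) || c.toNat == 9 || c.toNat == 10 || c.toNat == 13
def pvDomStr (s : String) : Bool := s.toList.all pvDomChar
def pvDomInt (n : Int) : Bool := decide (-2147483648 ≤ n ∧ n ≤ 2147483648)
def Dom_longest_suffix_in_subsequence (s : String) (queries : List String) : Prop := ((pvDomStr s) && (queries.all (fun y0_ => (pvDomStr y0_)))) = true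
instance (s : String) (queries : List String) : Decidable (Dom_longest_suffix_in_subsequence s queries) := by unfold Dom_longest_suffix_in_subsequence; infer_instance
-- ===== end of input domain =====

-- B replaces A's per-query rescans of s by a precomputed last-occurrence table of s
-- and one jump per matched character of each query (objective: faster, asymptotic).

-- ===== PORT A =====
-- the while-loop of A: state (i, j, matched_length); terminates because j drops each turn
def pvLoopA (p s : List Char) (i j m : Int) : Int :=
  if h : 0 ≤ i ∧ 0 ≤ j then
    if PySem.List.pyGet? p i = PySem.List.pyGet? s j then
      pvLoopA p s (i - 1) (j - 1) (m + 1)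
    else
      pvLoopA p s i (j - 1) m
  else m
termination_by (j + 1).toNat
decreasing_by all_goals omega

def longest_suffix_in_subsequence (s : String) (queries : List String) : List Int :=
  queries.foldl
    (fun results p =>
      results ++ [pvLoopA p.toList s.toList (PySem.Str.len p - 1) (PySem.Str.len s - 1) 0])
    []

-- ===== PORT B =====
-- Source B's first loop: prev[j] = dict of latest occurrence index of each char in s[:j+1]
-- (Python's `dict(last)` copy is the identity here: PySem.Dict is immutable)
def pvBuildPrev (sc : List Char) : List (PySem.Dict Char Int) :=
  ((PySem.List.enumerate sc).foldl
    (fun acc jc => (acc.1 ++ [acc.2.insert jc.2 jc.1], acc.2.insert jc.2 jc.1))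
    ([], PySem.Dict.empty)).1

-- Source B's inner loop over reversed(p); the two `break`s return cnt
def pvLoopB (prev : List (PySem.Dict Char Int)) : List Char → Int → Int → Int
  | [], _, cnt => cnt
  | ch :: rest, j, cnt =>
    if j < 0 then cnt
    else
      match PySem.List.pyGet? prev j with
      | none => cnt   -- unreachable: here 0 ≤ j < len prev, prev[j] never raises
      | some d =>
        let k := d.getD ch (-1)
        if k < 0 then cnt else pvLoopB prev rest (k - 1) (cnt + 1)

def longest_suffix_in_subsequence_alt (s : String) (queries : List String) : List Int :=
  let prev := pvBuildPrev s.toList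
  let n : Int := PySem.Str.len s
  queries.foldl (fun results p => results ++ [pvLoopB prev p.toList.reverse (n - 1) 0]) []

-- ===== PRECONDITION & SPEC =====
def Spec_longest_suffix_in_subsequence (s : String) (queries : List String) (out : List Int) : Prop := out = longest_suffix_in_subsequence_alt s queries
instance (s : String) (queries : List String) (out : List Int) : Decidable (Spec_longest_suffix_in_subsequence s queries out) := by unfold Spec_longest_suffix_in_subsequence; infer_instance

-- ===== CLAIM (what is proved, stated in full; the proofs are below) =====
def Claim_equal_longest_suffix_in_subsequence : Prop := ∀ (s : String) (queries : List String), Dom_longest_suffix_in_subsequence s queries → Spec_longest_suffix_in_subsequence s queries (longest_suffix_in_subsequence s queries)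

-- ===== LEMMAS AND PROOFS =====

-- reference: greedy right-to-left subsequence match count, on already-reversed lists
def pvG : List Char → List Char → Int
  | [], _ => 0
  | _ :: _, [] => 0
  | a :: pr, b :: sr => if a = b then 1 + pvG pr sr else pvG (a :: pr) sr

-- reference: index of the last occurrence of ch in l, -1 if absent
def pvLidx : List Char → Char → Int
  | [], _ => -1
  | a :: t, ch => if pvLidx t ch ≥ 0 then pvLidx t ch + 1 else if a = ch then 0 else -1

theorem pvG_nil_right (x : List Char) : pvG x [] = 0 := by
  cases x <;> rfl

theorem pvLidx_bound (l : List Char) (ch : Char) :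
    -1 ≤ pvLidx l ch ∧ pvLidx l ch < l.length := by
  induction l with
  | nil => simp [pvLidx]
  | cons a t ih =>
    simp only [pvLidx, List.length_cons]
    split_ifs <;> omega

theorem pvLidx_append (t : List Char) (c ch : Char) :
    pvLidx (t ++ [c]) ch = if c = ch then (t.length : Int) else pvLidx t ch := by
  induction t with
  | nil => simp [pvLidx]
  | cons a t ih =>
    have hb := pvLidx_bound t ch
    simp only [List.cons_append, pvLidx, ih, List.length_cons]
    split_ifs <;> omega

-- the jump step: matching a against l from the right lands at the last occurrence of a
theorem pvG_jump (l : List Char) (a : Char) (pr : List Char) :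
    pvG (a :: pr) l.reverse =
      if pvLidx l a = -1 then 0
      else 1 + pvG pr ((l.take (pvLidx l a).toNat).reverse) := by
  induction l using List.reverseRecOn with
  | nil => simp [pvLidx, pvG]
  | append_singleton t c ih =>
    rw [List.reverse_append]
    simp only [List.reverse_singleton, List.singleton_append, pvG, pvLidx_append]
    have hb := pvLidx_bound t a
    by_cases hca : c = a
    · subst hca
      have hne : ¬((t.length : Int) = -1) := by omega
      simp only [if_true]
      rw [if_neg hne, Int.toNat_natCast, List.take_left]
    · have hac : ¬ a = c := fun h => hca h.symm
      rw [if_neg hac, if_neg hca, ih]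
      by_cases h1 : pvLidx t a = -1
      · rw [if_pos h1, if_pos h1]
      · rw [if_neg h1, if_neg h1]
        have hle : (pvLidx t a).toNat ≤ t.length := by omega
        rw [List.take_append_of_le_length hle]

-- A's inner while-loop computes pvG on the reversed prefixes
theorem pvLoopA_eq (pc sc : List Char) (fuel : ℕ) :
    ∀ (i j m : Int), (j + 1).toNat = fuel → i < (pc.length : Int) → j < (sc.length : Int) →
      pvLoopA pc sc i j m =
        m + pvG ((pc.take (i + 1).toNat).reverse) ((sc.take (j + 1).toNat).reverse) := by
  induction fuel with
  | zero =>
    intro i j m hf hi hj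
    rw [pvLoopA, dif_neg (by omega)]
    have h0 : (j + 1).toNat = 0 := hf
    rw [h0]
    simp [pvG_nil_right]
  | succ n ih =>
    intro i j m hf hi hj
    by_cases hij : 0 ≤ i ∧ 0 ≤ j
    · obtain ⟨hi0, hj0⟩ := hij
      rw [pvLoopA, dif_pos ⟨hi0, hj0⟩]
      have hip : i.toNat < pc.length := by omega
      have hjp : j.toNat < sc.length := by omega
      rw [PySem.List.pyGet?_eq_some_getElem pc hi0 hi,
          PySem.List.pyGet?_eq_some_getElem sc hj0 hj]
      have hti : (i + 1).toNat = i.toNat + 1 := by omega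
      have htj : (j + 1).toNat = j.toNat + 1 := by omega
      rw [hti, htj, List.take_add_one, List.take_add_one,
          List.getElem?_eq_getElem hip, List.getElem?_eq_getElem hjp]
      simp only [Option.toList_some, List.reverse_append, List.reverse_singleton,
        List.singleton_append, pvG, Option.some.injEq]
      by_cases heq : pc[i.toNat] = sc[j.toNat]
      · rw [if_pos heq, if_pos heq, ih (i - 1) (j - 1) (m + 1) (by omega) (by omega) (by omega)]
        have h1 : (i - 1 + 1).toNat = i.toNat := by omega
        have h2 : (j - 1 + 1).toNat = j.toNat := by omega
        rw [h1, h2]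
        ring
      · rw [if_neg heq, if_neg heq, ih i (j - 1) m (by omega) hi (by omega)]
        have h2 : (j - 1 + 1).toNat = j.toNat := by omega
        rw [h2, hti, List.take_add_one, List.getElem?_eq_getElem hip]
        simp only [Option.toList_some, List.reverse_append, List.reverse_singleton,
          List.singleton_append]
    · rw [pvLoopA, dif_neg hij]
      rcases not_and_or.mp hij with hi0 | hj0
      · have : (i + 1).toNat = 0 := by omega
        rw [this]
        simp [pvG]
      · have : (j + 1).toNat = 0 := by omega
        rw [this]
        simp [pvG_nil_right]

-- the prev table: length |s|, entry jt holds the last-occurrence dict of s[:jt+1]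
theorem pvBuildPrev_spec (sc : List Char) :
    (pvBuildPrev sc).length = sc.length ∧
    ∀ jt : ℕ, jt < sc.length → ∀ ch : Char,
      ((pvBuildPrev sc).getD jt PySem.Dict.empty).getD ch (-1) = pvLidx (sc.take (jt + 1)) ch := by
  have main : ∀ (sc : List Char),
      let st := (PySem.List.enumerate sc).foldl
        (fun acc jc => (acc.1 ++ [acc.2.insert jc.2 jc.1], acc.2.insert jc.2 jc.1))
        (([] : List (PySem.Dict Char Int)), PySem.Dict.empty)
      st.1.length = sc.length ∧
      (∀ ch, st.2.getD ch (-1) = pvLidx sc ch) ∧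
      (∀ jt : ℕ, jt < sc.length → ∀ ch,
        (st.1.getD jt PySem.Dict.empty).getD ch (-1) = pvLidx (sc.take (jt + 1)) ch) := by
    intro sc
    induction sc using List.reverseRecOn with
    | nil =>
      refine ⟨rfl, fun ch => by simp [pvLidx, PySem.Dict.getD_empty], fun jt h => by simp at h⟩
    | append_singleton t c ih =>
      obtain ⟨hlen, hlast, hidx⟩ := ih
      rw [PySem.List.enumerate_append, List.foldl_append]
      simp only [PySem.List.enumerate_cons, PySem.List.enumerate_nil, List.foldl_cons,
        List.foldl_nil, List.length_append, List.length_singleton, zero_add]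
      refine ⟨by simp [hlen], ?_, ?_⟩
      · intro ch
        rw [PySem.Dict.getD_insert, pvLidx_append]
        by_cases h : ch = c
        · subst h; simp
        · rw [if_neg h, if_neg (fun hh => h hh.symm), hlast]
      · intro jt hjt ch
        by_cases hj : jt < t.length
        · rw [List.getD_append _ _ _ _ (by omega : jt < _)]
          rw [hidx jt hj ch, List.take_append_of_le_length (by omega)]
        · have hje : jt = t.length := by simp at hjt; omega
          subst hje
          rw [List.getD_eq_getElem _ _ (by simp [hlen]),
              List.getElem_append_right (by omega)]
          simp only [hlen, Nat.sub_self, List.getElem_singleton]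
          rw [PySem.Dict.getD_insert, List.take_of_length_le (by simp), pvLidx_append]
          by_cases h : ch = c
          · subst h; simp
          · rw [if_neg h, if_neg (fun hh => h hh.symm), hlast]
  obtain ⟨h1, _, h3⟩ := main sc
  exact ⟨h1, h3⟩

-- B's inner loop computes pvG too
theorem pvLoopB_eq (sc : List Char) (chs : List Char) :
    ∀ (j cnt : Int), j < (sc.length : Int) →
      pvLoopB (pvBuildPrev sc) chs j cnt =
        cnt + pvG chs ((sc.take (j + 1).toNat).reverse) := by
  obtain ⟨hplen, hspec⟩ := pvBuildPrev_spec sc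
  induction chs with
  | nil => intro j cnt _; simp [pvLoopB, pvG]
  | cons ch rest ih =>
    intro j cnt hj
    rw [pvLoopB]
    by_cases hj0 : j < 0
    · rw [if_pos hj0]
      have : (j + 1).toNat = 0 := by omega
      rw [this]
      simp [pvG]
    · rw [if_neg hj0]
      have hj0' : 0 ≤ j := by omega
      have hjr : j < ((pvBuildPrev sc).length : Int) := by rw [hplen]; exact hj
      rw [PySem.List.pyGet?_eq_some_getElem (pvBuildPrev sc) hj0' hjr]
      dsimp only
      have hjp : j.toNat < (pvBuildPrev sc).length := by omega
      have hget : (pvBuildPrev sc)[j.toNat] = (pvBuildPrev sc).getD j.toNat PySem.Dict.empty := by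
        rw [List.getD_eq_getElem _ _ hjp]
      have hjs : j.toNat < sc.length := by omega
      have hk : ((pvBuildPrev sc)[j.toNat]).getD ch (-1) = pvLidx (sc.take (j.toNat + 1)) ch := by
        rw [hget, hspec j.toNat hjs ch]
      have hjj : (j + 1).toNat = j.toNat + 1 := by omega
      have hjump := pvG_jump (sc.take (j.toNat + 1)) ch rest
      have hbound := pvLidx_bound (sc.take (j.toNat + 1)) ch
      simp only [List.length_take] at hbound
      by_cases hneg : ((pvBuildPrev sc)[j.toNat]).getD ch (-1) < 0
      · rw [if_pos hneg]
        have : pvLidx (sc.take (j.toNat + 1)) ch = -1 := by rw [← hk]; omega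
        rw [hjj, hjump, if_pos this]
        omega
      · rw [if_neg hneg]
        have hb2 := hbound.2
        push_cast at hb2
        have hk0 : 0 ≤ pvLidx (sc.take (j.toNat + 1)) ch := by rw [← hk]; omega
        rw [hk, ih (pvLidx (sc.take (j.toNat + 1)) ch - 1) (cnt + 1) (by omega)]
        rw [hjj, hjump, if_neg (by omega)]
        have h1 : (pvLidx (sc.take (j.toNat + 1)) ch - 1 + 1).toNat
            = (pvLidx (sc.take (j.toNat + 1)) ch).toNat := by omega
        rw [h1]
        have htt : (sc.take (j.toNat + 1)).take (pvLidx (sc.take (j.toNat + 1)) ch).toNat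
            = sc.take (pvLidx (sc.take (j.toNat + 1)) ch).toNat := by
          rw [List.take_take]
          congr 1
          omega
        rw [htt]
        ring

-- per query, the two loops agree
theorem pvQuery_eq (pc sc : List Char) :
    pvLoopA pc sc ((pc.length : Int) - 1) ((sc.length : Int) - 1) 0 =
      pvLoopB (pvBuildPrev sc) pc.reverse ((sc.length : Int) - 1) 0 := by
  rw [pvLoopA_eq pc sc ((sc.length : Int) - 1 + 1).toNat _ _ _ rfl (by omega) (by omega)]
  rw [pvLoopB_eq sc pc.reverse _ _ (by omega)]
  have h1 : ((pc.length : Int) - 1 + 1).toNat = pc.length := by omega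
  have h2 : ((sc.length : Int) - 1 + 1).toNat = sc.length := by omega
  rw [h1, h2, List.take_length, List.take_length]

-- ===== VERDICT (by name: the statement is the Claim_ definition above) =====
theorem longest_suffix_in_subsequence_spec : Claim_equal_longest_suffix_in_subsequence := by
  intro s queries _
  unfold Spec_longest_suffix_in_subsequence longest_suffix_in_subsequence
    longest_suffix_in_subsequence_alt
  simp only [PySem.Str.len_eq]
  have hfun :
      (fun (results : List Int) (p : String) =>
        results ++ [pvLoopA p.toList s.toList ((p.toList.length : Int) - 1) ((s.toList.length : Int) - 1) 0]) =
      (fun (results : List Int) (p : String) =>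
        results ++ [pvLoopB (pvBuildPrev s.toList) p.toList.reverse ((s.toList.length : Int) - 1) 0]) := by
    funext results p
    rw [pvQuery_eq]
  rw [hfun]
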